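-- pv_equiv track=rewrite | github.com/liupeiyu/LeetCode | String/string_0001_max_character_frequency.py | minFrequencyInSList
-- ===== SOURCE A (Python) =====
-- def minFrequencyInSList(s):
--     dicts_s,list_s={},[]
--     for element in s:
--         if element not in dicts_s:
--             dicts_s[element]=1
--         else:
--             dicts_s[element]+=1
--
--     for key in dicts_s.keys():
--         list_s.append(dicts_s[key])
--     return min(list_s)
-- ===== SOURCE B (Python) =====
-- def minFrequencyInSList(s):
--     def runs(t):
--         if not t:
--             return []
--         head = t[0]
--         i = 1
--         while i < len(t) and t[i] == head:
--             i += 1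
--         return [i] + runs(t[i:])
--     return min(runs(sorted(s)))
-- ===== Notes on version B (the rewrite author's own statement) =====
-- stated objective: alternative
-- what changed: B drops the frequency dictionary entirely: it sorts the string, splits the sorted sequence into maximal runs of equal characters by recursion, and returns the minimum run length.
import Mathlib
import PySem

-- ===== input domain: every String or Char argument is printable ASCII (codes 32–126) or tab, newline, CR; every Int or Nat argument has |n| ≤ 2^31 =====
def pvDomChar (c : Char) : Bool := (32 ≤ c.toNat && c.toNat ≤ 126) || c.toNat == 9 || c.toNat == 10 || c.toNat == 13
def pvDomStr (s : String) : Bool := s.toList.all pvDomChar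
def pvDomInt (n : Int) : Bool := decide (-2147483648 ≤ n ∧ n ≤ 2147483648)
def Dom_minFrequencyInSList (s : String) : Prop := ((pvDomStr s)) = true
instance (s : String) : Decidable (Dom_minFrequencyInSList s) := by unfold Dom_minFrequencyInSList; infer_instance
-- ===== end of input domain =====

-- B replaces A's frequency dictionary by sorting the string and splitting the sorted
-- sequence into maximal runs of equal characters (recursively), returning the minimum run length.

-- ===== PORT A =====
def minFrequencyInSList (s : String) : Int :=
  let dicts_s : PySem.Dict Char Int :=
    s.toList.foldl
      (fun d element =>
        if ¬ PySem.Dict.contains d element then PySem.Dict.insert d element 1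
        else PySem.Dict.insert d element (PySem.Dict.getD d element 0 + 1))
      PySem.Dict.empty
  let list_s : List Int :=
    (PySem.Dict.keys dicts_s).foldl (fun acc key => acc ++ [PySem.Dict.getD dicts_s key 0]) []
  match PySem.List.min? list_s (fun x => x) with
  | some v => v
  | none => 0        -- Python raises ValueError here (empty string); excluded by Pre_

-- ===== PORT B =====
-- the 'while i < len(t) and t[i] == head: i += 1' scan of Source B: counts the leading
-- elements of the tail equal to head and returns the remainder (exact, step for step)
def pvScanRun (head : Char) : List Char → Nat × List Char
  | [] => (0, [])
  | x :: r =>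
      if x == head then
        let p := pvScanRun head r
        (p.1 + 1, p.2)
      else (0, x :: r)

theorem pvScanRun_snd_length_le (head : Char) (l : List Char) :
    (pvScanRun head l).2.length ≤ l.length := by
  induction l with
  | nil => simp [pvScanRun]
  | cons x r ih =>
    by_cases h : (x == head) = true
    · simp only [pvScanRun, h, if_pos]
      exact le_trans ih (Nat.le_succ _)
    · simp [pvScanRun, h]

-- 'def runs(t)': maximal runs of equal elements, recursively
def pvRuns : List Char → List Int
  | [] => []
  | c :: r =>
      let p := pvScanRun c r
      ((p.1 : Int) + 1) :: pvRuns p.2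
termination_by t => t.length
decreasing_by
  exact Nat.lt_succ_of_le (pvScanRun_snd_length_le c r)

def minFrequencyInSList_alt (s : String) : Int :=
  match PySem.List.min? (pvRuns (PySem.List.sorted s.toList (fun x => x) false)) (fun x => x) with
  | some v => v
  | none => 0        -- Python raises ValueError here (empty string); excluded by Pre_

-- ===== PRECONDITION & SPEC =====
-- Pre_ excludes only the empty string, on which both Pythons raise ValueError (min of an empty sequence).
def Pre_minFrequencyInSList (s : String) : Prop := s.toList ≠ []
instance (s : String) : Decidable (Pre_minFrequencyInSList s) := by unfold Pre_minFrequencyInSList; infer_instance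
def pvWitness_minFrequencyInSList : String := "abca"

def Spec_minFrequencyInSList (s : String) (out : Int) : Prop := out = minFrequencyInSList_alt s
instance (s : String) (out : Int) : Decidable (Spec_minFrequencyInSList s out) := by unfold Spec_minFrequencyInSList; infer_instance

-- ===== CLAIM (what is proved, stated in full; the proofs are below) =====
def Claim_equal_minFrequencyInSList : Prop := ∀ (s : String), Dom_minFrequencyInSList s → Pre_minFrequencyInSList s → Spec_minFrequencyInSList s (minFrequencyInSList s)

-- ===== LEMMAS AND PROOFS =====

-- A's counting loop builds exactly Counter(chars).
theorem foldA_eq_counter (l : List Char) :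
    l.foldl
      (fun d element =>
        if ¬ PySem.Dict.contains d element then PySem.Dict.insert d element 1
        else PySem.Dict.insert d element (PySem.Dict.getD d element 0 + 1))
      PySem.Dict.empty = PySem.Dict.counter l := by
  rw [← PySem.Dict.foldl_insert_getD_add_one_eq_counter]
  apply List.foldl_ext
  intro d element _
  by_cases h : PySem.Dict.contains d element = true
  · simp [h]
  · simp [h, PySem.Dict.getD_of_not_contains d (0 : Int) (by simpa using h)]

-- characterisation of A: min over the counts of the distinct characters
theorem minFrequencyInSList_char (s : String) :
    minFrequencyInSList s =
      match PySem.List.min?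
        ((PySem.Set.ofList s.toList).map (fun c => (s.toList.count c : Int))) (fun x => x) with
      | some v => v
      | none => 0 := by
  simp only [minFrequencyInSList, foldA_eq_counter,
    PySem.List.foldl_append_singleton_eq_map, List.nil_append,
    PySem.Dict.keys_counter, PySem.Dict.getD_counter]

theorem pvScanRun_eq (head : Char) (l : List Char) :
    pvScanRun head l = ((l.takeWhile (· == head)).length, l.dropWhile (· == head)) := by
  induction l with
  | nil => simp [pvScanRun]
  | cons x r ih =>
    by_cases h : (x == head) = true
    · simp [pvScanRun, h, ih, Nat.add_comm]
    · simp [pvScanRun, h]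

-- on a ≤-sorted list, the run lengths are a permutation of the counts of the distinct elements
-- on a ≤-sorted suffix, the dropped-run remainder no longer contains the run's character
theorem not_mem_dropWhile_sorted (c : Char) (l : List Char)
    (hp : l.Pairwise (· ≤ ·)) (hle : ∀ x ∈ l, c ≤ x) :
    c ∉ l.dropWhile (· == c) := by
  induction l with
  | nil => simp
  | cons x r ih =>
    by_cases h : (x == c) = true
    · simp only [List.dropWhile_cons, h, if_pos]
      exact ih hp.tail (fun y hy => hle y (List.mem_cons_of_mem _ hy))
    · simp only [List.dropWhile_cons, h]
      intro hc
      rcases List.mem_cons.mp hc with rfl | hc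
      · simp at h
      · have hxc : x ≤ c := (List.pairwise_cons.mp hp).1 c hc
        have hcx : c ≤ x := hle x List.mem_cons_self
        have : x = c := le_antisymm hxc hcx
        simp [this] at h

theorem pvRuns_perm (t : List Char) (hs : t.Pairwise (· ≤ ·)) :
    (pvRuns t).Perm ((PySem.Set.ofList t).map (fun c => (t.count c : Int))) := by
  induction t using pvRuns.induct with
  | case1 => simp [pvRuns]
  | case2 c r p ih =>
    have hp : p = ((r.takeWhile (· == c)).length, r.dropWhile (· == c)) := pvScanRun_eq c r
    simp only [hp] at ih
    set tw := r.takeWhile (· == c) with htwdef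
    set dw := r.dropWhile (· == c) with hdwdef
    have hsplit : tw ++ dw = r := List.takeWhile_append_dropWhile
    have htw : ∀ x ∈ tw, x = c := fun x hx => by
      have := List.mem_takeWhile_imp hx; simpa using this
    have hcle : ∀ x ∈ r, c ≤ x := (List.pairwise_cons.mp hs).1
    have hdw_pw : dw.Pairwise (· ≤ ·) := hs.tail.sublist (List.dropWhile_sublist _)
    have hcdw : c ∉ dw := not_mem_dropWhile_sorted c r hs.tail hcle
    -- counts
    have hcount_tw : tw.count c = tw.length := List.count_eq_length.mpr (fun b hb => (htw b hb).symm)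
    have hcount_c : ((c :: r).count c : Int) = (tw.length : Int) + 1 := by
      rw [← hsplit]
      simp [List.count_append, hcount_tw, List.count_eq_zero.mpr hcdw]
    have hcount_d : ∀ d ∈ dw, (c :: r).count d = dw.count d := by
      intro d hd
      have hdc : d ≠ c := fun h => hcdw (h ▸ hd)
      have htwd : tw.count d = 0 := List.count_eq_zero.mpr (fun h => hdc (htw d h))
      rw [← hsplit]
      simp [List.count_append, htwd, hdc.symm]
    -- the distinct-element sets
    have hsetperm : (PySem.Set.ofList (c :: r)).Perm (c :: PySem.Set.ofList dw) := by
      have hnd1 : (PySem.Set.ofList (c :: r)).Nodup := PySem.Set.nodup_ofList _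
      have hnd2 : (c :: PySem.Set.ofList dw).Nodup := by
        refine List.nodup_cons.mpr ⟨?_, PySem.Set.nodup_ofList _⟩
        intro h; exact hcdw ((PySem.Set.mem_ofList _ _).mp h)
      refine (List.perm_ext_iff_of_nodup hnd1 hnd2).mpr ?_
      intro a
      simp only [PySem.Set.mem_ofList, List.mem_cons]
      constructor
      · rintro (rfl | ha)
        · exact Or.inl rfl
        · rw [← hsplit] at ha
          rcases List.mem_append.mp ha with h | h
          · exact Or.inl (htw a h)
          · exact Or.inr h
      · rintro (rfl | ha)
        · exact Or.inl rfl
        · exact Or.inr (by rw [← hsplit]; exact List.mem_append_right _ ha)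
    -- assemble
    have hrunseq : pvRuns (c :: r) = ((tw.length : Int) + 1) :: pvRuns dw := by
      rw [pvRuns, pvScanRun_eq]
    rw [hrunseq, ← hcount_c]
    refine ((ih hdw_pw).cons _).trans ?_
    have hmaps : (PySem.Set.ofList dw).map (fun d => (dw.count d : Int))
        = (PySem.Set.ofList dw).map (fun d => ((c :: r).count d : Int)) :=
      List.map_congr_left (fun d hd => by exact_mod_cast (hcount_d d ((PySem.Set.mem_ofList _ _).mp hd)).symm)
    rw [hmaps]
    have hconsmap : ((c :: r).count c : Int) :: (PySem.Set.ofList dw).map (fun d => ((c :: r).count d : Int))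
        = (c :: PySem.Set.ofList dw).map (fun d => ((c :: r).count d : Int)) := by simp
    rw [hconsmap]
    exact (hsetperm.map _).symm

-- min? with identity key returns the same value on permuted Int lists
theorem min?_id_perm (l₁ l₂ : List Int) (h : l₁.Perm l₂) :
    PySem.List.min? l₁ (fun x => x) = PySem.List.min? l₂ (fun x => x) := by
  match h1 : PySem.List.min? l₁ (fun x => x), h2 : PySem.List.min? l₂ (fun x => x) with
  | none, none => rfl
  | none, some m₂ =>
    rw [PySem.List.min?_eq_none_iff] at h1
    subst h1
    rw [(PySem.List.min?_eq_none_iff _ _).mpr (List.perm_nil.mp h.symm)] at h2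
    simp at h2
  | some m₁, none =>
    rw [PySem.List.min?_eq_none_iff] at h2
    subst h2
    rw [(PySem.List.min?_eq_none_iff _ _).mpr (List.perm_nil.mp h)] at h1
    simp at h1
  | some m₁, some m₂ =>
    have hm1 : m₁ ∈ l₁ := PySem.List.min?_mem h1
    have hm2 : m₂ ∈ l₂ := PySem.List.min?_mem h2
    have h1' : m₁ ≤ m₂ := by
      have := PySem.List.min?_isMin h1 m₂ (h.mem_iff.mpr hm2); simpa using this
    have h2' : m₂ ≤ m₁ := by
      have := PySem.List.min?_isMin h2 m₁ (h.mem_iff.mp hm1); simpa using this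
    rw [le_antisymm h1' h2']

theorem minFrequencyInSList_eq_alt (s : String) :
    minFrequencyInSList s = minFrequencyInSList_alt s := by
  rw [minFrequencyInSList_char, minFrequencyInSList_alt]
  set chars := s.toList with hchars
  set t := PySem.List.sorted chars (fun x => x) false with ht
  have hperm : t.Perm chars := PySem.List.sorted_perm chars (fun x => x) false
  have hpw : t.Pairwise (· ≤ ·) := PySem.List.sorted_pairwise chars (fun x => x)
  have h1 : (pvRuns t).Perm ((PySem.Set.ofList t).map (fun c => (t.count c : Int))) :=
    pvRuns_perm t hpw
  have hcnt : (PySem.Set.ofList t).map (fun c => (t.count c : Int))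
      = (PySem.Set.ofList t).map (fun c => (chars.count c : Int)) :=
    List.map_congr_left (fun d _ => by rw [hperm.count_eq])
  have hset : (PySem.Set.ofList t).Perm (PySem.Set.ofList chars) := by
    refine (List.perm_ext_iff_of_nodup (PySem.Set.nodup_ofList _) (PySem.Set.nodup_ofList _)).mpr ?_
    intro a
    simp only [PySem.Set.mem_ofList]
    exact hperm.mem_iff
  have h2 : (pvRuns t).Perm ((PySem.Set.ofList chars).map (fun c => (chars.count c : Int))) := by
    rw [hcnt] at h1
    exact h1.trans (hset.map _)
  rw [min?_id_perm _ _ h2]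

-- ===== VERDICT (by name: the statement is the Claim_ definition above) =====
theorem minFrequencyInSList_spec : Claim_equal_minFrequencyInSList := by
  intro s _ _
  exact minFrequencyInSList_eq_alt s
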